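-- pv_equiv track=rewrite | github.com/jchy20/how-much-backtrack | reasoning-gym/reasoning_gym/arc/arc_1d_tasks.py | transform_reflect_block_around_dot
-- ===== SOURCE A (Python) =====
-- def transform_reflect_block_around_dot(input_grid: list[int]) -> list[int]:
--     size = len(input_grid)
--     dot_color = 2
--
--     # Find the dot position
--     try:
--         dot_pos = input_grid.index(dot_color)
--     except ValueError:
--         raise ValueError("Input grid must contain exactly one dot (value 2).")
--
--     # Identify the block: all positions with a color >= 3
--     block_indices = [i for i, v in enumerate(input_grid) if v >= 3]
--     if not block_indices:
--         # No block => nothing to reflect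
--         return input_grid.copy()
--
--     block_start = min(block_indices)
--     block_end   = max(block_indices)
--     block_size  = block_end - block_start + 1
--
--     # Extract block colors in order
--     block = [input_grid[i] for i in range(block_start, block_end + 1)]
--
--     # Build the answer as a fresh zero-field
--     answer = [0] * size
--     # Copy the dot
--     answer[dot_pos] = dot_color
--
--     # Reflect each element of the block
--     # reflection: new_idx = 2*dot_pos - original_idx
--     for offset, color in enumerate(block):
--         orig_idx   = block_start + offset
--         reflect_idx = 2 * dot_pos - orig_idx
--         if not (0 <= reflect_idx < size):
--             raise ValueError("Reflection would go out of bounds.")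
--         answer[reflect_idx] = color
--
--     return answer
-- ===== SOURCE B (Python) =====
-- def transform_reflect_block_around_dot(input_grid: list[int]) -> list[int]:
--     size = len(input_grid)
--     dot_pos = input_grid.index(2)  # same ValueError when no dot
--
--     block_indices = [i for i, v in enumerate(input_grid) if v >= 3]
--     if not block_indices:
--         return input_grid.copy()
--
--     lo, hi = block_indices[0], block_indices[-1]
--     if not (0 <= 2 * dot_pos - hi and 2 * dot_pos - lo < size):
--         raise ValueError("Reflection would go out of bounds.")
--
--     # Gather: each output cell pulls its value from its mirror position,
--     # instead of scattering block cells into a mutable answer.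
--     return [
--         2 if j == dot_pos else
--         (input_grid[2 * dot_pos - j] if lo <= 2 * dot_pos - j <= hi else 0)
--         for j in range(size)
--     ]
-- ===== Notes on version B (the rewrite author's own statement) =====
-- stated objective: alternative
-- what changed: B inverts the data flow: instead of A's scatter (mutate a zero answer array, writing each block cell at its reflected index with a per-write bounds check), B does one closed-form bounds check and builds the output in a single gather comprehension where each output position pulls its value from its mirror position if that falls in the block span, else 0, with the dot fixed at its own position.
import Mathlib
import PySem

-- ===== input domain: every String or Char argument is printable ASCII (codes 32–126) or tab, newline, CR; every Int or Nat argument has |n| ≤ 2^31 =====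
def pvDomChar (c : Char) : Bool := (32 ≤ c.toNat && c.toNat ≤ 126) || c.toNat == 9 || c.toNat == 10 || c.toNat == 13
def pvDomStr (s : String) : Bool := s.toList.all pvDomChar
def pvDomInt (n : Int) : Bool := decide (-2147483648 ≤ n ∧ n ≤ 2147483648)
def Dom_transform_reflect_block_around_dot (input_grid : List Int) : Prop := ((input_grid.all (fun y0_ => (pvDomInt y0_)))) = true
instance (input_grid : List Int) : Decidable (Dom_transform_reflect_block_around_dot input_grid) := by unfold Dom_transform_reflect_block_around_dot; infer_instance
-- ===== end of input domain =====

-- B replaces A's scatter (mutating an answer array by writing each reflected block cell)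
-- with a gather: one comprehension over output positions pulling each value from its mirror (simpler).


-- ===== PORT A =====
-- A's reflection loop: `for offset, color in enumerate(block): … answer[reflect_idx] = color`,
-- `none` = the ValueError "Reflection would go out of bounds."
def pvReflLoop (d s : Int) (size : Nat) : List (Int × Int) → List Int → Option (List Int)
  | [], ans => some ans
  | (o, c) :: rest, ans =>
    let reflect_idx := 2 * d - (s + o)
    if 0 ≤ reflect_idx ∧ reflect_idx < (size : Int) then
      pvReflLoop d s size rest (ans.set reflect_idx.toNat c)
    else none

def transform_reflect_block_around_dot (input_grid : List Int) : List Int :=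
  let size := input_grid.length
  match PySem.List.index? input_grid 2 with
  | none => []  -- ValueError "Input grid must contain exactly one dot (value 2)." (excluded by Pre_)
  | some dot_pos =>
    let block_indices : List Int :=
      ((PySem.List.enumerate input_grid 0).filter (fun p => decide (3 ≤ p.2))).map (·.1)
    if block_indices = [] then input_grid
    else
      let block_start := (PySem.List.min? block_indices (fun x => x)).getD 0
      let block_end := (PySem.List.max? block_indices (fun x => x)).getD 0
      -- input_grid[i] for i in range(block_start, block_end+1): indices are in range, pyGetD is exact
      let block := (PySem.List.pyRange block_start (block_end + 1) 1).map
        (fun i => PySem.List.pyGetD input_grid i 0)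
      let answer := (List.replicate size (0 : Int)).set dot_pos 2
      (pvReflLoop (dot_pos : Int) block_start size (PySem.List.enumerate block 0) answer).getD []

-- ===== PORT B =====
def transform_reflect_block_around_dot_alt (input_grid : List Int) : List Int :=
  let size := input_grid.length
  match PySem.List.index? input_grid 2 with
  | none => []  -- ValueError (excluded by Pre_)
  | some dot_pos =>
    let block_indices : List Int :=
      ((PySem.List.enumerate input_grid 0).filter (fun p => decide (3 ≤ p.2))).map (·.1)
    match block_indices with
    | [] => input_grid
    | lo :: bt =>
      let hi := (lo :: bt).getLast (List.cons_ne_nil _ _)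
      if 0 ≤ 2 * (dot_pos : Int) - hi ∧ 2 * (dot_pos : Int) - lo < (size : Int) then
        -- gather: [2 if j == dot_pos else (g[2*dot_pos-j] if lo <= 2*dot_pos-j <= hi else 0) for j in range(size)]
        (PySem.List.pyRange 0 size 1).map (fun j =>
          if j = (dot_pos : Int) then (2 : Int)
          else if lo ≤ 2 * (dot_pos : Int) - j ∧ 2 * (dot_pos : Int) - j ≤ hi then
            PySem.List.pyGetD input_grid (2 * (dot_pos : Int) - j) 0
          else 0)
      else []  -- ValueError "Reflection would go out of bounds." (excluded by Pre_)

-- ===== PRECONDITION & SPEC =====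
-- Pre_ excludes exactly the inputs on which A raises ValueError: grids with no dot (no value 2),
-- and grids where reflecting some block cell (value >= 3) around the first dot lands out of bounds.
def Pre_transform_reflect_block_around_dot (input_grid : List Int) : Prop :=
  2 ∈ input_grid ∧
  ∀ i ∈ List.range input_grid.length, 3 ≤ input_grid.getD i 0 →
    0 ≤ 2 * (input_grid.idxOf 2 : Int) - i ∧
    2 * (input_grid.idxOf 2 : Int) - i < input_grid.length

instance (input_grid : List Int) : Decidable (Pre_transform_reflect_block_around_dot input_grid) := by
  unfold Pre_transform_reflect_block_around_dot; infer_instance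

def pvWitness_transform_reflect_block_around_dot : List Int := [0, 3, 2, 0]

def Spec_transform_reflect_block_around_dot (input_grid : List Int) (out : List Int) : Prop := out = transform_reflect_block_around_dot_alt input_grid
instance (input_grid : List Int) (out : List Int) : Decidable (Spec_transform_reflect_block_around_dot input_grid out) := by unfold Spec_transform_reflect_block_around_dot; infer_instance

-- ===== CLAIM (what is proved, stated in full; the proofs are below) =====
def Claim_equal_transform_reflect_block_around_dot : Prop := ∀ (input_grid : List Int), Dom_transform_reflect_block_around_dot input_grid → Pre_transform_reflect_block_around_dot input_grid → Spec_transform_reflect_block_around_dot input_grid (transform_reflect_block_around_dot input_grid)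

-- ===== LEMMAS AND PROOFS =====

def pvBI (g : List Int) : List Int :=
  ((PySem.List.enumerate g 0).filter (fun p => decide (3 ≤ p.2))).map (·.1)

theorem pvBI_mem (g : List Int) (x : Int) (hx : x ∈ pvBI g) :
    ∃ k : Nat, ∃ h : k < g.length, x = (k : Int) ∧ 3 ≤ g[k] := by
  simp only [pvBI, List.mem_map, List.mem_filter, PySem.List.mem_enumerate_iff] at hx
  obtain ⟨p, ⟨⟨k, hk, rfl⟩, h3⟩, rfl⟩ := hx
  exact ⟨k, hk, by simp, by simpa using h3⟩

theorem pvLe_getLast : ∀ (t : List Int) (h : Int), (h :: t).Pairwise (· < ·) →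
    ∀ y ∈ h :: t, y ≤ (h :: t).getLast (List.cons_ne_nil _ _) := by
  intro t
  induction t with
  | nil => intro h _ y hy; simp_all
  | cons h' t' ih =>
    intro h hs y hy
    have h1 := (List.pairwise_cons.1 hs).1
    have h2 := (List.pairwise_cons.1 hs).2
    rw [List.getLast_cons (List.cons_ne_nil _ _)]
    rcases List.mem_cons.1 hy with rfl | hyt
    · have := ih h' h2 h' (by simp)
      have := h1 h' (by simp)
      omega
    · exact ih h' h2 y hyt

theorem pvMax_sorted (h : Int) (t : List Int) (hs : (h :: t).Pairwise (· < ·)) :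
    PySem.List.max? (h :: t) (fun x => x) = some ((h :: t).getLast (List.cons_ne_nil _ _)) := by
  cases hm : PySem.List.max? (h :: t) (fun x => x) with
  | none => simp [PySem.List.max?_eq_none_iff] at hm
  | some m =>
    have hmem := PySem.List.max?_mem hm
    have hge := PySem.List.max?_isMax hm _ (List.getLast_mem (List.cons_ne_nil h t))
    have hle := pvLe_getLast t h hs m hmem
    simp only [Option.some_inj]
    omega

theorem pvRange_natCast (n : Nat) : ∀ (s : Nat), PySem.List.pyRange (s:Int) ((s:Int)+(n:Int)) 1 = (List.range' s n).map (Nat.cast) := by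
  induction n with
  | zero => intro s; simp [PySem.List.pyRange]
  | succ n ih =>
    intro s
    rw [PySem.List.pyRange_one_cons (by omega)]
    rw [show (s:Int) + 1 = ((s+1:Nat):Int) by push_cast; ring,
        show (s:Int) + ((n:Nat)+1:Nat) = ((s+1:Nat):Int) + (n:Nat) by push_cast; ring]
    rw [ih (s+1)]
    simp [List.range'_succ]

theorem pvBlock_eq (g : List Int) (s e : Nat) (he : e < g.length) (hse : s ≤ e) :
    (PySem.List.pyRange (s : Int) ((e : Int) + 1) 1).map (fun i => PySem.List.pyGetD g i 0)
      = (g.drop s).take (e + 1 - s) := by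
  rw [show ((e:Int) + 1) = (s:Int) + ((e+1-s : Nat):Int) by omega, pvRange_natCast]
  rw [List.map_map]
  apply List.ext_getElem
  · simp; omega
  · intro i h1 h2
    simp only [List.getElem_map, List.getElem_range', Function.comp_apply]
    rw [PySem.List.pyGetD_natCast]
    simp at h1 ⊢
    simp [List.getElem?_eq_getElem (by omega : s + i < g.length)]

def pvOverlay (ans : List Int) (k : Nat) (seg : List Int) : List Int :=
  ans.take k ++ seg ++ ans.drop (k + seg.length)

theorem pvOverlay_snoc (ans R : List Int) (k : Nat) (c : Int)
    (h : k + R.length < ans.length) :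
    pvOverlay (ans.set (k + R.length) c) k R = pvOverlay ans k (R ++ [c]) := by
  unfold pvOverlay
  rw [List.drop_set, if_neg (by omega), List.drop_eq_getElem_cons h, Nat.sub_self, List.set_cons_zero]
  rw [List.take_set, List.set_eq_of_length_le (by simp)]
  rw [show k + (R ++ [c]).length = k + R.length + 1 by simp; omega]
  simp

theorem pvReflLoop_eq (d s : Int) (size : Nat) (bl : List Int) :
    ∀ (o₀ : Int) (ans : List Int), ans.length = size →
    0 ≤ 2 * d - (s + o₀) - bl.length + 1 → 2 * d - (s + o₀) < (size : Int) →
    pvReflLoop d s size (PySem.List.enumerate bl o₀) ans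
      = some (pvOverlay ans (2 * d - (s + o₀) - bl.length + 1).toNat bl.reverse) := by
  induction bl with
  | nil =>
    intro o₀ ans hlen _ _
    simp [PySem.List.enumerate, pvReflLoop, pvOverlay]
  | cons c bl ih =>
    intro o₀ ans hlen hlo hhi
    rw [PySem.List.enumerate_cons]
    rw [pvReflLoop]
    rw [if_pos (by constructor <;> [simp at hlo ⊢; skip] <;> omega)]
    rw [ih (o₀ + 1) _ (by simpa using hlen) (by simp at hlo ⊢; omega) (by omega)]
    congr 1
    have hk : (2 * d - (s + (o₀ + 1)) - ↑bl.length + 1).toNat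
        = (2 * d - (s + o₀) - ↑(c :: bl).length + 1).toNat := by simp; omega
    rw [hk]
    set k := (2 * d - (s + o₀) - ↑(c :: bl).length + 1).toNat with hkdef
    have hr : (2 * d - (s + o₀)).toNat = k + bl.reverse.length := by
      simp [hkdef]; simp at hlo; omega
    rw [hr, pvOverlay_snoc ans bl.reverse k c (by simp at hlo ⊢; omega)]
    simp

theorem pvOverlay_replicate (n k : Nat) (seg : List Int) (h : k + seg.length ≤ n) :
    pvOverlay (List.replicate n (0 : Int)) k seg
      = List.replicate k (0 : Int) ++ seg ++ List.replicate (n - (k + seg.length)) (0 : Int) := by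
  unfold pvOverlay
  rw [List.take_replicate, List.drop_replicate, Nat.min_eq_left (by omega)]

theorem pvOverlay_length (ans seg : List Int) (k : Nat) (hk : k + seg.length ≤ ans.length) :
    (pvOverlay ans k seg).length = ans.length := by
  simp [pvOverlay]; omega

theorem pvOverlay_getElem (ans seg : List Int) (k : Nat) (hk : k + seg.length ≤ ans.length)
    (i : Nat) (hi : i < ans.length) :
    (pvOverlay ans k seg)[i]'(by rw [pvOverlay_length ans seg k hk]; exact hi)
      = if h : k ≤ i ∧ i < k + seg.length then seg[i - k]'(by omega) else ans[i] := by
  unfold pvOverlay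
  simp only [List.getElem_append, List.length_take, List.length_append, List.getElem_take,
    List.getElem_drop]
  split_ifs <;> first
    | rfl
    | omega
    | (congr 1; omega)

theorem pvOverlay_set_comm (ans seg : List Int) (k d : Nat)
    (hk : k + seg.length ≤ ans.length)
    (hmid : ∀ hge : k ≤ d, ∀ hlt : d < k + seg.length, seg[d - k]'(by omega) = 2) :
    pvOverlay (ans.set d 2) k seg = (pvOverlay ans k seg).set d 2 := by
  have hk' : k + seg.length ≤ (ans.set d 2).length := by simp; omega
  apply List.ext_getElem
  · rw [List.length_set, pvOverlay_length _ _ _ hk', pvOverlay_length _ _ _ hk, List.length_set]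
  · intro i hi1 hi2
    have hi : i < ans.length := by
      rw [pvOverlay_length _ _ _ hk'] at hi1; simpa using hi1
    rw [pvOverlay_getElem (ans.set d 2) seg k hk' i (by simpa using hi)]
    rw [List.getElem_set]
    conv_rhs => rw [List.getElem_set]
    rw [pvOverlay_getElem ans seg k hk i hi]
    by_cases hreg : k ≤ i ∧ i < k + seg.length
    · rw [dif_pos hreg, dif_pos hreg]
      split_ifs with hdi
      · subst hdi; exact hmid hreg.1 hreg.2
      · rfl
    · rw [dif_neg hreg, dif_neg hreg]

theorem pvBI_pairwise (g : List Int) : (pvBI g).Pairwise (· < ·) := by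
  exact ((PySem.List.pairwise_lt_enumerate g 0).filter _).map _ (fun a b h => h)

theorem pvMin_sorted (h : Int) (t : List Int) (hs : (h :: t).Pairwise (· < ·)) :
    PySem.List.min? (h :: t) (fun x => x) = some h := by
  cases hm : PySem.List.min? (h :: t) (fun x => x) with
  | none => simp [PySem.List.min?_eq_none_iff] at hm
  | some m =>
    have hmem := PySem.List.min?_mem hm
    have hle := PySem.List.min?_isMin hm h (by simp)
    rcases List.mem_cons.1 hmem with rfl | hmt
    · rfl
    · have := (List.pairwise_cons.1 hs).1 m hmt
      omega

-- The scatter result, pointwise, equals B's gather comprehension.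
theorem pv_gather (g : List Int) (dp sn en : Nat)
    (hen : en < g.length) (hse : sn ≤ en)
    (hloB : 0 ≤ 2 * (dp : Int) - en) (hhiB : 2 * (dp : Int) - sn < (g.length : Int)) :
    ((List.replicate (2 * (dp:Int) - en).toNat (0:Int)
        ++ ((g.drop sn).take (en + 1 - sn)).reverse
        ++ List.replicate (g.length - ((2 * (dp:Int) - en).toNat + (en + 1 - sn)) ) (0:Int)).set dp 2)
      = (PySem.List.pyRange 0 (g.length : Int) 1).map (fun j =>
          if j = (dp : Int) then (2 : Int)
          else if (sn : Int) ≤ 2 * (dp : Int) - j ∧ 2 * (dp : Int) - j ≤ (en : Int) then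
            PySem.List.pyGetD g (2 * (dp : Int) - j) 0
          else 0) := by
  have h0 : PySem.List.pyRange 0 (g.length : Int) 1 = (List.range' 0 g.length).map Nat.cast := by
    have := pvRange_natCast g.length 0
    simpa using this
  rw [h0, List.map_map]
  set rsN := (2 * (dp:Int) - en).toNat with hrsN
  set blk := (g.drop sn).take (en + 1 - sn) with hblkdef
  have hblklen : blk.length = en + 1 - sn := by simp [hblkdef]; omega
  apply List.ext_getElem
  · simp [hblklen]; omega
  · intro i hi1 hi2
    have hig : i < g.length := by simpa using hi2
    simp only [List.getElem_map, List.getElem_range', Function.comp_apply]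
    rw [show 0 + 1 * i = i from by omega]
    rw [List.getElem_set]
    by_cases hidp : i = dp
    · rw [if_pos hidp.symm, if_pos (by exact_mod_cast hidp)]
    · rw [if_neg (fun h => hidp h.symm), if_neg (by exact_mod_cast hidp)]
      simp only [List.getElem_append, List.length_append, List.length_replicate,
        List.length_reverse, hblklen]
      by_cases hB : i < rsN
      · -- left replicate: mirror lands beyond the block
        rw [dif_pos (show i < rsN + (en + 1 - sn) by omega), dif_pos hB, if_neg (by omega)]
        simp
      · by_cases hA : i < rsN + (en + 1 - sn)
        · -- inside the reversed block
          rw [dif_pos hA, dif_neg hB, if_pos (by omega)]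
          rw [List.getElem_reverse]
          rw [show 2 * (dp:Int) - i = ((2 * dp - i : Nat) : Int) from by omega,
            PySem.List.pyGetD_natCast]
          have hlt : (2 * dp - i : Nat) < g.length := by omega
          rw [List.getD_eq_getElem g 0 hlt]
          simp only [hblkdef, List.getElem_take, List.getElem_drop]
          have hbl2 : (List.take (en + 1 - sn) (List.drop sn g)).length = en + 1 - sn := by
            simp; omega
          congr 1
          omega
        · -- past the block: right replicate, mirror lands before the block
          rw [dif_neg hA, if_neg (by omega)]
          simp

theorem pv_main (g : List Int) (hpre : Pre_transform_reflect_block_around_dot g) :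
    transform_reflect_block_around_dot g = transform_reflect_block_around_dot_alt g := by
  obtain ⟨h2, hbound⟩ := hpre
  obtain ⟨dp, hdp⟩ := Option.isSome_iff_exists.1 ((PySem.List.index?_isSome_iff g 2).2 h2)
  obtain ⟨hdplt, hgdp, _hminim⟩ := PySem.List.getElem_of_index?_eq_some hdp
  have hidx : g.idxOf 2 = dp := by
    rw [PySem.List.index?_eq_idxOf?] at hdp
    simp [List.idxOf_eq_getD_idxOf?, hdp]
  rw [hidx] at hbound
  simp only [transform_reflect_block_around_dot, transform_reflect_block_around_dot_alt, hdp]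
  cases hbi : pvBI g with
  | nil => simp only [pvBI] at hbi; rw [hbi]; simp
  | cons bh bt =>
    have hbi' := hbi
    simp only [pvBI] at hbi'
    rw [hbi']
    rw [if_neg (by simp)]
    have hpw : (bh :: bt).Pairwise (· < ·) := hbi ▸ pvBI_pairwise g
    rw [pvMin_sorted bh bt hpw, pvMax_sorted bh bt hpw]
    -- naturals behind bh and the last block index
    obtain ⟨sn, hsnlt, rfl, hs3⟩ := pvBI_mem g bh (by rw [hbi]; simp)
    obtain ⟨en, henlt, hbeq, he3⟩ := pvBI_mem g (((sn:Int) :: bt).getLast (List.cons_ne_nil _ _))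
      (by rw [hbi]; exact List.getLast_mem _)
    simp only [hbeq]
    have hse : sn ≤ en := by
      have := pvLe_getLast bt ((sn:Int)) hpw (sn:Int) (by simp)
      rw [hbeq] at this; omega
    -- bounds from Pre_
    have hbnd_s := hbound sn (by simp; omega) (by simp [List.getD, List.getElem?_eq_getElem hsnlt, hs3])
    have hbnd_e := hbound en (by simp; omega) (by simp [List.getD, List.getElem?_eq_getElem henlt, he3])
    -- block equality
    have hblockA := pvBlock_eq g sn en henlt hse
    set blk := (g.drop sn).take (en + 1 - sn) with hblk
    have hblklen : blk.length = en + 1 - sn := by simp [hblk]; omega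
    simp only [Option.getD_some]
    rw [hblockA]
    -- B's guard holds
    rw [if_pos (by constructor <;> omega)]
    -- A's loop
    rw [pvReflLoop_eq (dp : Int) (sn : Int) g.length blk 0 _
        (by simp) (by rw [hblklen]; omega) (by omega)]
    simp only [Option.getD_some]
    have hK : (2 * (dp:Int) - ((sn:Int) + 0) - blk.length + 1).toNat
        = (2 * (dp:Int) - (en:Int)).toNat := by rw [hblklen]; omega
    rw [hK]
    set rsN := (2 * (dp:Int) - (en:Int)).toNat with hrsN
    have hrange : rsN + blk.length ≤ g.length := by rw [hblklen]; simp [hrsN]; omega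
    rw [pvOverlay_set_comm (List.replicate g.length 0) blk.reverse rsN dp
        (by simpa using hrange)
        (by
          intro hge hlt
          rw [List.getElem_reverse]
          have hmid1 : sn ≤ dp ∧ dp ≤ en := by
            simp only [hrsN, List.length_reverse, hblklen] at hge hlt; omega
          simp only [hblk, List.getElem_take, List.getElem_drop]
          convert hgdp using 2
          simp only [List.length_take, List.length_drop, hrsN]
          omega)]
    rw [pvOverlay_replicate _ _ _ (by simpa using hrange)]
    rw [show rsN + blk.reverse.length = rsN + (en + 1 - sn) by simp [hblklen]]
    exact pv_gather g dp sn en henlt hse (by omega) (by omega)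

-- ===== VERDICT (by name: the statement is the Claim_ definition above) =====
theorem transform_reflect_block_around_dot_spec : Claim_equal_transform_reflect_block_around_dot := by
  intro input_grid _hdom hpre
  unfold Spec_transform_reflect_block_around_dot
  exact pv_main input_grid hpre
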